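-- pv_equiv track=rewrite | github.com/wangsun39/leetcode | allcode/3300-3399/3374capitalize_content.py | row_convert
-- ===== SOURCE A (Python) =====
-- def row_convert(row):
--     # 可以访问多列
--     seg = row.split(' ')
--     for i in range(len(seg)):
--         s = seg[i].split('-')
--         for j in range(len(s)):
--             s[j] = s[j].capitalize()
--         seg[i] = '-'.join(s)
--     return ' '.join(seg)
-- ===== SOURCE B (Python) =====
-- def row_convert(row):
--     out = []
--     at_start = True
--     for ch in row:
--         if ch == ' ' or ch == '-':
--             out.append(ch)
--             at_start = True
--         elif at_start:
--             out.append(ch.upper())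
--             at_start = False
--         else:
--             out.append(ch.lower())
--     return ''.join(out)
-- ===== Notes on version B (the rewrite author's own statement) =====
-- stated objective: simpler
-- what changed: Replaced the nested split-by-space / split-by-hyphen / capitalize / double-join pipeline with a single left-to-right character scan that keeps one segment-start boolean.
import Mathlib
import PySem

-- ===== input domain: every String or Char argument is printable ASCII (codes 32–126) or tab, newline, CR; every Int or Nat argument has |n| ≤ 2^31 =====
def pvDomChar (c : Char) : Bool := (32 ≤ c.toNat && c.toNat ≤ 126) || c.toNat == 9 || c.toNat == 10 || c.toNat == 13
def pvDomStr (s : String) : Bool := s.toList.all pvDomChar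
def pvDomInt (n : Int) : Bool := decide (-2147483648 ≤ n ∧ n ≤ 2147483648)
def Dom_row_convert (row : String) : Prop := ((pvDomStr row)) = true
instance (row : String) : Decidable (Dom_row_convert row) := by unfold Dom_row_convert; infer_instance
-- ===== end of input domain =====

-- B replaces A's split/split/capitalize/join pipeline by one character scan with a segment-start flag (simpler; same result).

-- ===== PORT A =====
-- s.capitalize(): upper-case the first char, lower-case the rest (exact on the ASCII domain,
-- where Python's title-casing of the first char coincides with upper-casing).
def pyCapitalize (s : String) : String :=
  match s.toList with
  | [] => String.ofList []
  | c :: cs => String.ofList (PySem.Chars.upperChar c :: PySem.Chars.lower cs)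

def row_convert (row : String) : String :=
  let seg := (PySem.Str.split? row " ").getD []
  let seg := seg.map (fun sg =>
    PySem.Str.join "-" (((PySem.Str.split? sg "-").getD []).map pyCapitalize))
  PySem.Str.join " " seg

-- ===== PORT B =====
def pvScan (atStart : Bool) : List Char → List Char
  | [] => []
  | c :: cs =>
    if c = ' ' || c = '-' then c :: pvScan true cs
    else (if atStart then PySem.Chars.upperChar c else PySem.Chars.lowerChar c) :: pvScan false cs

def row_convert_alt (row : String) : String := String.ofList (pvScan true row.toList)

-- ===== PRECONDITION & SPEC =====
def Spec_row_convert (row : String) (out : String) : Prop := out = row_convert_alt row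
instance (row : String) (out : String) : Decidable (Spec_row_convert row out) := by unfold Spec_row_convert; infer_instance

-- ===== CLAIM (what is proved, stated in full; the proofs are below) =====
def Claim_equal_row_convert : Prop := ∀ (row : String), Dom_row_convert row → Spec_row_convert row (row_convert row)

-- ===== LEMMAS AND PROOFS =====
set_option maxRecDepth 4000

-- single-character split, the list-level spine of A's two `.split` calls
def pvSplit1 (d : Char) : List Char → List (List Char)
  | [] => [[]]
  | c :: cs =>
    if c = d then [] :: pvSplit1 d cs
    else match pvSplit1 d cs with
         | [] => [[c]]
         | p :: ps => (c :: p) :: ps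

def pvHeadPre (a : List Char) : List (List Char) → List (List Char)
  | [] => [a]
  | p :: ps => (a ++ p) :: ps

theorem pvSplit1_ne_nil (d : Char) (cs : List Char) : pvSplit1 d cs ≠ [] := by
  cases cs with
  | nil => simp [pvSplit1]
  | cons c cs =>
    simp only [pvSplit1]
    split
    · simp
    · split <;> simp

theorem pvGo_spec (d : Char) : ∀ (fuel : Nat) (l cur : List Char) (acc : List (List Char)),
    l.length ≤ fuel →
    PySem.Chars.splitOn.go [d] fuel l cur acc = acc.reverse ++ pvHeadPre cur.reverse (pvSplit1 d l) := by
  intro fuel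
  induction fuel with
  | zero =>
    intro l cur acc h
    have : l = [] := by cases l <;> simp_all
    subst this
    rw [PySem.Chars.splitOn.go.eq_def]
    simp [pvSplit1, pvHeadPre]
  | succ fuel ih =>
    intro l cur acc h
    cases l with
    | nil =>
      rw [PySem.Chars.splitOn.go.eq_def]
      simp [pvSplit1, pvHeadPre]
    | cons c rest =>
      rw [PySem.Chars.splitOn.go.eq_def]
      simp only [List.isPrefixOf, List.length_cons]
      by_cases hc : c = d
      · subst hc
        simp only [beq_self_eq_true, Bool.true_and, if_pos]
        rw [ih _ _ _ (by simpa using Nat.le_of_succ_le_succ h)]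
        obtain ⟨p, ps, hps⟩ : ∃ p ps, pvSplit1 c rest = p :: ps := by
          cases hx : pvSplit1 c rest with
          | nil => exact absurd hx (pvSplit1_ne_nil c rest)
          | cons p ps => exact ⟨p, ps, rfl⟩
        have h2 : pvSplit1 c (c :: rest) = [] :: p :: ps := by simp [pvSplit1, hps]
        simp only [List.length_nil, Nat.zero_add, List.drop_succ_cons, List.drop_zero,
          List.reverse_nil, List.reverse_cons, h2, hps, pvHeadPre, List.nil_append,
          List.append_assoc, List.cons_append, List.append_nil]
      · have hbeq : (d == c) = false := beq_eq_false_iff_ne.mpr (Ne.symm hc)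
        simp only [hbeq, Bool.false_and, if_neg, Bool.false_eq_true, not_false_iff]
        rw [ih _ _ _ (by simpa using Nat.le_of_succ_le_succ h)]
        cases hx : pvSplit1 d rest with
        | nil => exact absurd hx (pvSplit1_ne_nil d rest)
        | cons p ps =>
          have h2 : pvSplit1 d (c :: rest) = (c :: p) :: ps := by simp [pvSplit1, hc, hx]
          simp only [h2, pvHeadPre, List.reverse_cons, List.append_assoc, List.cons_append,
            List.nil_append]

theorem pvSplitOn_single (d : Char) (cs : List Char) :
    PySem.Chars.splitOn cs [d] = pvSplit1 d cs := by
  unfold PySem.Chars.splitOn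
  rw [pvGo_spec d _ _ _ _ (Nat.le_succ _)]
  cases hx : pvSplit1 d cs with
  | nil => exact absurd hx (pvSplit1_ne_nil d cs)
  | cons p ps => simp [pvHeadPre]

-- char-level capitalize
def pvCap : List Char → List Char
  | [] => []
  | c :: cs => PySem.Chars.upperChar c :: PySem.Chars.lower cs

def pvProcSeg (sg : List Char) : List Char :=
  PySem.Chars.join ['-'] ((pvSplit1 '-' sg).map pvCap)

def pvProcSegL (sg : List Char) : List Char :=
  match pvSplit1 '-' sg with
  | [] => []
  | p :: ps => PySem.Chars.join ['-'] (PySem.Chars.lower p :: ps.map pvCap)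

def pvAC (cs : List Char) : List Char :=
  PySem.Chars.join [' '] ((pvSplit1 ' ' cs).map pvProcSeg)

def pvLC (cs : List Char) : List Char :=
  match pvSplit1 ' ' cs with
  | [] => []
  | sg :: sgs => PySem.Chars.join [' '] (pvProcSegL sg :: sgs.map pvProcSeg)

theorem pvJoin_head_cons (sep : List Char) (a : Char) (x : List Char) (xs : List (List Char)) :
    PySem.Chars.join sep ((a :: x) :: xs) = a :: PySem.Chars.join sep (x :: xs) := by
  cases xs with
  | nil => simp [PySem.Chars.join_singleton]
  | cons y ys => simp [PySem.Chars.join_cons_cons]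

theorem pvJoin_nil_cons (d : Char) (y : List Char) (ys : List (List Char)) :
    PySem.Chars.join [d] ([] :: y :: ys) = d :: PySem.Chars.join [d] (y :: ys) := by
  simp [PySem.Chars.join_cons_cons]

theorem pvProcSeg_nil : pvProcSeg [] = [] := by
  simp [pvProcSeg, pvSplit1, pvCap, PySem.Chars.join_singleton]

theorem pvProcSeg_dash (p : List Char) : pvProcSeg ('-' :: p) = '-' :: pvProcSeg p := by
  unfold pvProcSeg
  obtain ⟨q, qs, hqs⟩ : ∃ q qs, pvSplit1 '-' p = q :: qs := by
    cases hx : pvSplit1 '-' p with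
    | nil => exact absurd hx (pvSplit1_ne_nil _ _)
    | cons q qs => exact ⟨q, qs, rfl⟩
  simp [pvSplit1, hqs, pvCap, pvJoin_nil_cons]

theorem pvProcSeg_char (c : Char) (hc : c ≠ '-') (p : List Char) :
    pvProcSeg (c :: p) = PySem.Chars.upperChar c :: pvProcSegL p := by
  unfold pvProcSeg pvProcSegL
  obtain ⟨q, qs, hqs⟩ : ∃ q qs, pvSplit1 '-' p = q :: qs := by
    cases hx : pvSplit1 '-' p with
    | nil => exact absurd hx (pvSplit1_ne_nil _ _)
    | cons q qs => exact ⟨q, qs, rfl⟩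
  simp [pvSplit1, hc, hqs, pvCap, pvJoin_head_cons]

theorem pvProcSegL_nil : pvProcSegL [] = [] := by
  simp [pvProcSegL, pvSplit1, PySem.Chars.lower, PySem.Chars.join_singleton]

theorem pvProcSegL_dash (p : List Char) : pvProcSegL ('-' :: p) = '-' :: pvProcSeg p := by
  unfold pvProcSegL pvProcSeg
  obtain ⟨q, qs, hqs⟩ : ∃ q qs, pvSplit1 '-' p = q :: qs := by
    cases hx : pvSplit1 '-' p with
    | nil => exact absurd hx (pvSplit1_ne_nil _ _)
    | cons q qs => exact ⟨q, qs, rfl⟩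
  simp [pvSplit1, hqs, PySem.Chars.lower, pvJoin_nil_cons]

theorem pvProcSegL_char (c : Char) (hc : c ≠ '-') (p : List Char) :
    pvProcSegL (c :: p) = PySem.Chars.lowerChar c :: pvProcSegL p := by
  unfold pvProcSegL
  obtain ⟨q, qs, hqs⟩ : ∃ q qs, pvSplit1 '-' p = q :: qs := by
    cases hx : pvSplit1 '-' p with
    | nil => exact absurd hx (pvSplit1_ne_nil _ _)
    | cons q qs => exact ⟨q, qs, rfl⟩
  simp [pvSplit1, hc, hqs, PySem.Chars.lower, pvJoin_head_cons]

theorem pvScan_eq : ∀ (cs : List Char), pvScan true cs = pvAC cs ∧ pvScan false cs = pvLC cs := by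
  intro cs
  induction cs with
  | nil =>
    constructor <;> simp [pvScan, pvAC, pvLC, pvSplit1, pvProcSeg_nil, pvProcSegL_nil,
      PySem.Chars.join_singleton]
  | cons c cs ih =>
    obtain ⟨p, ps, hps⟩ : ∃ p ps, pvSplit1 ' ' cs = p :: ps := by
      cases hx : pvSplit1 ' ' cs with
      | nil => exact absurd hx (pvSplit1_ne_nil _ _)
      | cons p ps => exact ⟨p, ps, rfl⟩
    by_cases hsp : c = ' '
    · subst hsp
      have hAC : pvAC (' ' :: cs) = ' ' :: pvAC cs := by
        simp [pvAC, pvSplit1, hps, pvProcSeg_nil, pvJoin_nil_cons]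
      have hLC : pvLC (' ' :: cs) = ' ' :: pvAC cs := by
        simp [pvLC, pvAC, pvSplit1, hps, pvProcSegL_nil, pvJoin_nil_cons]
      constructor <;> simp [pvScan, hAC, hLC, ih.1]
    · by_cases hda : c = '-'
      · subst hda
        have hAC : pvAC ('-' :: cs) = '-' :: pvAC cs := by
          simp [pvAC, pvSplit1, hps, pvProcSeg_dash, pvJoin_head_cons]
        have hLC : pvLC ('-' :: cs) = '-' :: pvAC cs := by
          simp [pvLC, pvAC, pvSplit1, hps, pvProcSegL_dash, pvJoin_head_cons]
        constructor <;> simp [pvScan, hAC, hLC, ih.1]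
      · have hAC : pvAC (c :: cs) = PySem.Chars.upperChar c :: pvLC cs := by
          simp [pvAC, pvLC, pvSplit1, hsp, hps, pvProcSeg_char c hda, pvJoin_head_cons]
        have hLC : pvLC (c :: cs) = PySem.Chars.lowerChar c :: pvLC cs := by
          simp [pvLC, pvSplit1, hsp, hps, pvProcSegL_char c hda, pvJoin_head_cons]
        constructor <;> simp [pvScan, hsp, hda, hAC, hLC, ih.2]

theorem pvCapitalize_ofList (p : List Char) :
    pyCapitalize (String.ofList p) = String.ofList (pvCap p) := by
  cases p <;> simp [pyCapitalize, pvCap]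

theorem pvRowConvert_toList (row : String) :
    (row_convert row).toList = pvAC row.toList := by
  unfold row_convert
  simp [PySem.Str.split?, PySem.Chars.split?, PySem.Str.join, pvSplitOn_single,
    pvAC, List.map_map,
    show (" " : String).toList = [' '] from rfl, show ("-" : String).toList = ['-'] from rfl]
  congr 1
  apply List.map_congr_left
  intro sg _
  simp only [Function.comp_apply, String.toList_ofList]
  have hmap : List.map (String.toList ∘ pyCapitalize ∘ String.ofList) (pvSplit1 '-' sg)
      = List.map pvCap (pvSplit1 '-' sg) :=
    List.map_congr_left (fun p _ => by simp [Function.comp, pvCapitalize_ofList])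
  rw [hmap]
  rfl

-- ===== VERDICT (by name: the statement is the Claim_ definition above) =====
theorem row_convert_spec : Claim_equal_row_convert := by
  intro row _
  unfold Spec_row_convert row_convert_alt
  rw [← String.toList_inj, String.toList_ofList, pvRowConvert_toList, (pvScan_eq row.toList).1]
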